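/- GENERATED by tools/from_farm_form.py from prooffarm-gif/accepted/DGifCloseFile.2/Proof.lean (a worked proof of the farm's unit `DGifCloseFile.2`,
   accepted by the verdict) — do not edit. -/
import Gif.Spec.Units.DGifCloseFile_2
import Gif.Spec.AllSegs

open X86 X86.User Asan ProgX.Base ProgX.Base.Spec Gif.Spec

set_option maxRecDepth 4000
set_option maxHeartbeats 4000000

/-!
  Segment 2 of `DGifCloseFile` (109CB5H … 109CDDH, 10 instructions; dgif_lib.c:695-697):
  `if (GifFile->SColorMap) { GifFreeMapObject(GifFile->SColorMap); GifFile->SColorMap = NULL; }`.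

      CUT 109CB5H ─ checked load of gif.SColorMap ─ test rdi, rdi ─┬─ NULL (F.scm = none) ──────────────────────────────── CUT 109CDDH
                                                                   └─ GifFreeMapObject ─ ret6 ─ checked store of NULL ─ CUT 109CDDH

  The split on the GHOST `F.scm` comes before the walk: each walk then has one live arm (the load is given as a fact).
  NULL: nothing but the check's return address is written: the same heap `Hc`; `noMaps F = noIcm F` (`cf2_noMaps_eq`).
  A MAP `m`: the callee frees `m.colors`, then `m.obj`: the heap is `(Hc.release m.colors).release m.obj`. THE TWO HALVES OF THE STATE
  INVARIANT MOVE SEPARATELY. `Owns`: `Owns.free_scm`. `Shape`: ONE step from the cut's memory to the exit's (`Shape.set_scm` with `none`):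
  the callee's footprint is loose (`Loose.freeMap`), the last window is the field `gif.SColorMap` itself, which holds the stored NULL.
  The heap's invariant: the callee's post, then `HeapInv.sameExcept_stack_live` (the check's return address; 8 bytes of the live gif).
-/

namespace Gif.Spec.DGifCloseFile_2

/-- With no screen colour map, the forest without the maps is the forest without the image's map. -/
theorem cf2_noMaps_eq (F : Forest) (h : F.scm = none) : DGifCloseFile.noMaps F = DGifCloseFile.noIcm F := by
  cases F
  simp only at h
  subst h
  rfl

end Gif.Spec.DGifCloseFile_2

/-- Segment 2 of `DGifCloseFile`: from `Ok` at 109CB5H (forest `noIcm F`) to `Ok` at 109CDDH (forest `noMaps F`), for the heap `Hc`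
(no screen colour map) or `(Hc.release m.colors).release m.obj` (the screen colour map `m` freed). -/
theorem Gif.Spec.Proved.DGifCloseFile_2_ok : Gif.Spec.DGifCloseFile_2.Statement := by
  intro Lay hLay μ hμ u₀ hcode h_load8 h_free h_store8 H rest frames F R Hc e ret v hat0
  obtain ⟨hat, hok⟩ := hat0
  -- THE CARRIED ENTRY (facts about `e`) and the present state `v` under the names the walker reads
  have he := hat.entry
  v_entry he
  obtain ⟨henv, hrdi, herr⟩ := hat.pre
  have w_rip := hat.rip
  have c_rsp : v.reg .rsp = e.reg .rsp - 40 := hat.rsp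
  have c_rbx : v.reg .rbx = e.reg .rdi := hat.rbx
  have w_kept : RegsKept [.rsp] v v := RegsKept.refl _ _
  have w_eq : Mem.EqOn ProgX.Base.L.textLo ProgX.Base.L.textHi u₀.mem v.mem := ProgX.Base.conv_code_eqOn hat.code
  have hdf : v.flags .df = false := (show abiInv _ from hat.abi).1
  have hmx : v.mxcsr &&& 0x1F80 = 0x1F80 := (show abiInv _ from hat.abi).2
  have hsse : SseOK v := ProgX.Base.sseOK_of_abiInv hat.abi
  -- where gif is, as numbers (one inequality per hypothesis); the cursor; the five stack slots of the assertion
  have hinv := hat.inv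
  have hbase : Hc.base = 0x800000 := hat.region.1.trans henv.heap.base
  have hcur := henv.ctx.cursor_range hinv.shadow
  have hplaced : Placed Hc (DGifCloseFile.noIcm F).owned := hok.owns.placed hinv.heap
  have hglive : Hc.Live F.gif 120 := hok.gif_live
  have hgrg := hglive.range hbase hinv.heap
  obtain ⟨hg1, hg2⟩ := hgrg
  have hscm : MapAt F.scm (GifFileType.SColorMap v.mem F.gif) v.mem := hok.shape.scm
  have k_r13 : v.mem.readLE (e.reg .rsp - 8) 8 = (e.reg .r13).toNat := hat.slot_r13
  have k_r12 : v.mem.readLE (e.reg .rsp - 16) 8 = (e.reg .r12).toNat := hat.slot_r12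
  have k_rbp : v.mem.readLE (e.reg .rsp - 24) 8 = (e.reg .rbp).toNat := hat.slot_rbp
  have k_rbx : v.mem.readLE (e.reg .rsp - 32) 8 = (e.reg .rbx).toNat := hat.slot_rbx
  have k_ra : UInt64.ofNat (v.mem.readLE (e.reg .rsp) 8) = ret := hat.slot_ra
  cases hm : F.scm with
  | none =>
    -- NO SCREEN COLOUR MAP: the field is NULL, `je` is taken: nothing is freed, the heap stays `Hc`
    rw [hm] at hscm
    have hscm0 : GifFileType.SColorMap v.mem F.gif = 0 := hscm
    simp only [gfield] at hscm0
    have l_scm : v.mem.readLE (e.reg .rdi + 0x18) 8 = 0 := by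
      rw [rd_eq_readLE v.mem (e.reg .rdi + 0x18) (F.gif + 24) 8 (by u_omega)]
      exact hscm0
    -- THE WALK (0x109cb5, l.695): `lea`, the checked load, `test ; je` taken, to the cut 109CDDH
    u_walk hcode [hμ.vendor] until [Gif.L.DGifCloseFile.at_109cdd] span [ProgX.Base.L.textLo, ProgX.Base.L.textHi] side (v_side)
    case check_109cb9 =>
      -- 0x109cb9 (l.695): the load of `gif.SColorMap` lies inside gif
      have hun : ShadowUntouched v.mem s_109cb9.mem := by v_untouched
      have hl : LiveIn (Hc.liveObjs ++ rest) frames F.gif 120 := hglive.liveIn rest frames (Nat.le_refl _) (Nat.le_refl _)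
      exact hl.accSmall hinv.shadow hun _ 8 (by decide) (by u_omega) (by u_omega)
    -- 0x109cdd (CUT): the only store is the return address of the check, below the stack pointer
    have hs : Mem.SameExcept [⟨(e.reg .rsp).toNat - 48, (e.reg .rsp).toNat - 40⟩] v.mem s_109cc5.mem := by
      rw [w_mem]
      u_same
    have hloose : ∀ w, w ∈ [(⟨(e.reg .rsp).toNat - 48, (e.reg .rsp).toNat - 40⟩ : Span)] →
        Loose Hc (DGifCloseFile.noIcm F) R w := by
      intro w hw
      have ew : w = ⟨(e.reg .rsp).toNat - 48, (e.reg .rsp).toNat - 40⟩ := List.mem_singleton.mp hw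
      subst ew
      exact Loose.stack hinv.heap (by simp only; omega) (by simp only; omega) (by simp only; omega)
    have hs13 : s_109cc5.mem.readLE (e.reg .rsp - 8) 8 = (e.reg .r13).toNat := by u_frame k_r13
    have hs12 : s_109cc5.mem.readLE (e.reg .rsp - 16) 8 = (e.reg .r12).toNat := by u_frame k_r12
    have hsbp : s_109cc5.mem.readLE (e.reg .rsp - 24) 8 = (e.reg .rbp).toNat := by u_frame k_rbp
    have hsbx : s_109cc5.mem.readLE (e.reg .rsp - 32) 8 = (e.reg .rbx).toNat := by u_frame k_rbx
    have hsra : UInt64.ofNat (s_109cc5.mem.readLE (e.reg .rsp) 8) = ret := by u_frame k_ra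
    have hinv2 : HeapInv Hc rest frames ((e.reg .rsp).toNat - 40) s_109cc5.mem := by
      rw [w_mem]
      exact hinv.writeLE_out _ _ _ (by u_omega) (by rw [hbase]; left; u_omega) (by left; u_omega)
    have hok2 : GifOK Hc (DGifCloseFile.noMaps F) R s_109cc5.mem := by
      rw [Gif.Spec.DGifCloseFile_2.cf2_noMaps_eq F hm]
      exact hok.sameExcept hinv.heap ⟨hcur.1, hcur.2.1⟩ hs hloose
    have hrem : rem R s_109cc5.mem = rem R e.mem := by
      rw [← hat.rem]
      exact rem_loose hs hloose hinv.heap hplaced ⟨hcur.1, hcur.2.1⟩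
    have hsame0 := hat.same
    have hsame : Mem.SameExcept [⟨(e.reg .rsp).toNat - 160, (e.reg .rsp).toNat⟩, ⟨0x800000, 0x1000020⟩,
        ⟨(e.reg .rsi).toNat, (e.reg .rsi).toNat + 4⟩] e.mem s_109cc5.mem := by
      rw [w_mem]
      u_same
    have x_df : s_109cc5.flags .df = false := by
      rw [w_flags, X86.User.df_setStatus]
      exact w_df_109cb9
    have x_mx : s_109cc5.mxcsr &&& 0x1F80 = 0x1F80 := by
      rw [w_mxcsr]
      exact hmx
    have habi : (conv u₀).inv s_109cc5 := by v_inv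
    exact ReachVia.done ⟨Hc, {
      at_ := {
        entry := hat.entry
        pre := hat.pre
        rip := w_rip
        rsp := w_rsp
        rbx := (w_kept.get .rbx rfl).trans c_rbx
        rbp := (w_kept.get .rbp rfl).trans hat.rbp
        r14 := (w_kept.get .r14 rfl).trans hat.r14
        r15 := (w_kept.get .r15 rfl).trans hat.r15
        slot_r13 := hs13
        slot_r12 := hs12
        slot_rbp := hsbp
        slot_rbx := hsbx
        slot_ra := hsra
        inv := hinv2
        region := hat.region
        rem := hrem
        same := hsame
        code := ProgX.Base.conv_code_in w_eq
        abi := habi }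
      ok := hok2 }⟩
  | some m =>
    -- A SCREEN COLOUR MAP: the field holds `m.obj ≠ 0`: `GifFreeMapObject(m.obj)` frees `m.colors`, then `m.obj`
    have hms : (DGifCloseFile.noIcm F).scm = some m := hm
    obtain ⟨hl1, hl2, hne, hcol⟩ := hok.scm_live hms
    rw [hm] at hscm
    have hscm1 : GifFileType.SColorMap v.mem F.gif = m.obj := hscm.1
    simp only [gfield] at hscm1
    have l_scm : v.mem.readLE (e.reg .rdi + 0x18) 8 = m.obj := by
      rw [rd_eq_readLE v.mem (e.reg .rdi + 0x18) (F.gif + 24) 8 (by u_omega)]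
      exact hscm1
    obtain ⟨hr1a, hr1b⟩ := hl1.range hbase hinv.heap
    obtain ⟨hr2a, hr2b⟩ := hl2.range hbase hinv.heap
    have hm64 : (UInt64.ofNat m.obj).toNat = m.obj := toNat_ofNat_addr m.obj (by omega)
    have hfm := h_free Hc rest frames m.colors (3 * m.count)
    -- WALK 1 (0x109cb5, l.695-696): `lea`, the checked load, `test ; je` not taken, `call GifFreeMapObject`, to its return
    u_walk hcode [hμ.vendor] until [Gif.L.DGifCloseFile.at_109cdd] span [ProgX.Base.L.textLo, ProgX.Base.L.textHi] side (v_side)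
    case check_109cb9 =>
      -- 0x109cb9 (l.695): the load of `gif.SColorMap` lies inside gif
      have hun : ShadowUntouched v.mem s_109cb9.mem := by v_untouched
      have hl : LiveIn (Hc.liveObjs ++ rest) frames F.gif 120 := hglive.liveIn rest frames (Nat.le_refl _) (Nat.le_refl _)
      exact hl.accSmall hinv.shadow hun _ 8 (by decide) (by u_omega) (by u_omega)
    case call_inv =>
      -- the ABI's invariant at the callee's entry: DF and the MXCSR masks
      have x_df : s_109cc7.flags .df = false := by
        rw [w_flags, X86.User.df_setStatus]
        exact w_df_109cb9
      have x_mx : s_109cc7.mxcsr &&& 0x1F80 = 0x1F80 := by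
        rw [w_mxcsr]
        exact hmx
      v_inv
    case pre_109cc7 =>
      -- 0x109cc7 (l.696) `GifFreeMapObject(GifFile->SColorMap)`
      refine ⟨HeapPre.at_push henv.heap hat.region hinv w_rsp w_mem (by u_omega), Or.inr ?_⟩
      rw [w_rdi, hm64]
      refine ⟨hl1, hl2, hne, ?_⟩
      simp only [gfield] at hcol ⊢
      rw [w_mem, rd_writeLE_disjoint _ _ _ _ _ _ (by u_omega) (by omega) (by right; u_omega)]
      exact hcol
    -- 0x109ccc (ret6): `GifFreeMapObject` has returned: the heap is `(Hc.release m.colors).release m.obj`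
    have hne0 : (s_109cc7.reg .rdi).toNat ≠ 0 := by
      rw [w_rdi_109cc7, hm64]
      omega
    have hinv2 := w_post.2 hne0
    have e8 : (s_109cc7.reg .rsp).toNat + 8 = (e.reg .rsp).toNat - 40 := by
      rw [w_rsp_109cc7]
      u_omega
    rw [w_rdi_109cc7, hm64, e8] at hinv2
    clear w_post
    v_after_call w_rsp_109cc7 w_mem_109cc7
    simp only [shadowSpan, w_rdi_109cc7, hm64] at w_same
    -- what was written since the cut: stack below the stack pointer, two header words, shadow: loose windows
    have hs1 : Mem.SameExcept [⟨(e.reg .rsp).toNat - 96, (e.reg .rsp).toNat - 40⟩, ⟨m.colors - 24, m.colors - 16⟩,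
        ⟨0xC00000 + m.colors / 8, 0xC00000 + (m.colors + 3 * m.count + 7) / 8⟩, ⟨m.obj - 24, m.obj - 16⟩,
        ⟨0xC00000 + m.obj / 8, 0xC00000 + (m.obj + 24 + 7) / 8⟩] v.mem s_109cc7r.mem := by u_same
    -- what is owned in the heap of the callee's post: gif is still live there
    have hown3 : Owns ((Hc.release m.colors).release m.obj) (DGifCloseFile.noMaps F).owned := hok.owns.free_scm hms
    have hglive2 : ((Hc.release m.colors).release m.obj).Live F.gif 120 := hown3.live _ List.mem_cons_self
    -- WALK 2 (0x109ccc, l.697): `lea`, the checked store `gif.SColorMap = NULL`, to the cut 109CDDH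
    u_walk hcode [hμ.vendor] until [Gif.L.DGifCloseFile.at_109cdd] span [ProgX.Base.L.textLo, ProgX.Base.L.textHi] side (v_side)
    case check_109cd0 =>
      -- 0x109cd0 (l.697): the store of `gif.SColorMap` lies inside gif, live in the heap of the callee's post
      have hun : ShadowUntouched s_109cc7r.mem s_109cd0.mem := by v_untouched
      have hl : LiveIn (((Hc.release m.colors).release m.obj).liveObjs ++ rest) frames F.gif 120 :=
        hglive2.liveIn rest frames (Nat.le_refl _) (Nat.le_refl _)
      exact hl.accSmall hinv2.shadow hun _ 8 (by decide) (by u_omega) (by u_omega)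
    -- 0x109cdd (CUT): since the return: the check's return address (stack) and the field `gif.SColorMap`
    have hreg2 : SameRegion Hc ((Hc.release m.colors).release m.obj) :=
      (SameRegion.release Hc m.colors).trans (SameRegion.release _ m.obj)
    have hbase2 : ((Hc.release m.colors).release m.obj).base = 0x800000 := hreg2.1.trans hbase
    have hs2 : Mem.SameExcept [⟨(e.reg .rsp).toNat - 40 - 8, (e.reg .rsp).toNat - 40⟩, ⟨F.gif + 24, F.gif + 24 + 8⟩]
        s_109cc7r.mem s_109cd5.mem := by
      rw [w_mem]
      u_same
    have hun2 : ShadowUntouched s_109cc7r.mem s_109cd5.mem := by v_untouched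
    have hinv3 : HeapInv ((Hc.release m.colors).release m.obj) rest frames ((e.reg .rsp).toNat - 40) s_109cd5.mem :=
      hinv2.sameExcept_stack_live hbase2 hun2 (by omega) hglive2 (by omega) (by omega) hs2
    -- the whole footprint since the cut at 109CB5H: loose windows, and the field `gif.SColorMap`
    have hs : Mem.SameExcept [⟨(e.reg .rsp).toNat - 96, (e.reg .rsp).toNat - 40⟩, ⟨m.colors - 24, m.colors - 16⟩,
        ⟨0xC00000 + m.colors / 8, 0xC00000 + (m.colors + 3 * m.count + 7) / 8⟩, ⟨m.obj - 24, m.obj - 16⟩,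
        ⟨0xC00000 + m.obj / 8, 0xC00000 + (m.obj + 24 + 7) / 8⟩, ⟨F.gif + 24, F.gif + 32⟩] v.mem s_109cd5.mem := by
      rw [w_mem]
      u_same
    have hloose5 := Loose.freeMap (F := DGifCloseFile.noIcm F) (R := R)
      (lo := (e.reg .rsp).toNat - 96) (hi := (e.reg .rsp).toNat - 40) hinv.heap ⟨hcur.1, hcur.2.1⟩ hl1 hl2 (by omega) (by omega)
    have hl6 : ∀ w, w ∈ [(⟨(e.reg .rsp).toNat - 96, (e.reg .rsp).toNat - 40⟩ : Span), ⟨m.colors - 24, m.colors - 16⟩,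
        ⟨0xC00000 + m.colors / 8, 0xC00000 + (m.colors + 3 * m.count + 7) / 8⟩, ⟨m.obj - 24, m.obj - 16⟩,
        ⟨0xC00000 + m.obj / 8, 0xC00000 + (m.obj + 24 + 7) / 8⟩, ⟨F.gif + 24, F.gif + 32⟩] →
        Loose Hc (DGifCloseFile.noIcm F) R w ∨
          ((DGifCloseFile.noIcm F).gif + 24 ≤ w.lo ∧ w.hi ≤ (DGifCloseFile.noIcm F).gif + 32) := by
      intro w hw
      simp only [List.mem_cons, List.not_mem_nil, or_false] at hw
      rcases hw with ew | ew | ew | ew | ew | ew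
      · exact Or.inl (hloose5 w (by rw [ew]; simp only [List.mem_cons, true_or]))
      · exact Or.inl (hloose5 w (by rw [ew]; simp only [List.mem_cons, true_or, or_true]))
      · exact Or.inl (hloose5 w (by rw [ew]; simp only [List.mem_cons, true_or, or_true]))
      · exact Or.inl (hloose5 w (by rw [ew]; simp only [List.mem_cons, true_or, or_true]))
      · exact Or.inl (hloose5 w (by rw [ew]; simp only [List.mem_cons, true_or, or_true]))
      · subst ew
        exact Or.inr ⟨Nat.le_refl _, Nat.le_refl _⟩
    -- the stored NULL, read back
    have hnull : MapAt none (GifFileType.SColorMap s_109cd5.mem (DGifCloseFile.noIcm F).gif) s_109cd5.mem := by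
      show GifFileType.SColorMap s_109cd5.mem F.gif = 0
      simp only [gfield]
      rw [w_mem, rd_writeLE_same _ _ 8 0 (F.gif + 24) (by u_omega) (by omega)]
    have hshape : Shape (DGifCloseFile.noMaps F) R s_109cd5.mem :=
      hok.shape.set_scm hplaced hinv.heap ⟨hcur.1, hcur.2.1⟩ hs hl6 none hnull
    have hrem : rem R s_109cd5.mem = rem R e.mem := by
      rw [← hat.rem]
      apply rem_sameExcept hs (by omega)
      intro w hw
      rcases hl6 w hw with hlw | hgw
      · exact hlw.off_cursor hinv.heap hplaced ⟨hcur.1, hcur.2.1⟩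
      · right
        have hgw1 : F.gif + 24 ≤ w.lo := hgw.1
        omega
    -- the five stack slots, through that footprint
    -- (without `he_align : rsp % 8 = 0`: with it `omega` fails on the shadow windows)
    have hs13 : s_109cd5.mem.readLE (e.reg .rsp - 8) 8 = (e.reg .r13).toNat := by
      clear he_align
      u_frame k_r13
    have hs12 : s_109cd5.mem.readLE (e.reg .rsp - 16) 8 = (e.reg .r12).toNat := by
      clear he_align
      u_frame k_r12
    have hsbp : s_109cd5.mem.readLE (e.reg .rsp - 24) 8 = (e.reg .rbp).toNat := by
      clear he_align
      u_frame k_rbp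
    have hsbx : s_109cd5.mem.readLE (e.reg .rsp - 32) 8 = (e.reg .rbx).toNat := by
      clear he_align
      u_frame k_rbx
    have hsra : UInt64.ofNat (s_109cd5.mem.readLE (e.reg .rsp) 8) = ret := by
      clear he_align
      u_frame k_ra
    -- the contract's windows, since the entry
    have hsame0 := hat.same
    have hsame : Mem.SameExcept [⟨(e.reg .rsp).toNat - 160, (e.reg .rsp).toNat⟩, ⟨0x800000, 0x1000020⟩,
        ⟨(e.reg .rsi).toNat, (e.reg .rsi).toNat + 4⟩] e.mem s_109cd5.mem := by
      clear he_align
      rw [w_mem]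
      u_same
    -- the ABI's invariant: DF and the MXCSR masks
    have x_df : s_109cd5.flags .df = false := by
      rw [w_flags]
      exact w_df_109cd0
    have x_mx : s_109cd5.mxcsr &&& 0x1F80 = 0x1F80 := by
      rw [w_mxcsr]
      exact w_mx
    have habi : (conv u₀).inv s_109cd5 := by v_inv
    exact ReachVia.done ⟨(Hc.release m.colors).release m.obj, {
      at_ := {
        entry := hat.entry
        pre := hat.pre
        rip := w_rip
        rsp := w_rsp
        rbx := (w_kept.get .rbx rfl).trans c_rbx
        rbp := (w_kept.get .rbp rfl).trans hat.rbp
        r14 := (w_kept.get .r14 rfl).trans hat.r14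
        r15 := (w_kept.get .r15 rfl).trans hat.r15
        slot_r13 := hs13
        slot_r12 := hs12
        slot_rbp := hsbp
        slot_rbx := hsbx
        slot_ra := hsra
        inv := hinv3
        region := hat.region.trans hreg2
        rem := hrem
        same := hsame
        code := ProgX.Base.conv_code_in w_eq
        abi := habi }
      ok := ⟨hown3, hshape⟩ }⟩
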